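-- pv_equiv track=rewrite | github.com/ilastik/ilastik | ilastik/applets/labeling/connectBlockedLabels.py | positive_boundaries
-- ===== SOURCE A (Python) =====
-- from enum import IntEnum, StrEnum
-- from typing import Dict, Iterator, List, Optional, Sequence, Tuple, Union
--
-- class Neighborhood(IntEnum):
--     """
--     Connectivity paradigm describing the search space for neighbors of a block.
--
--     The value corresponds to the number of hops, as in the connectivity parameter
--     for skimage.measure.label (see their docs for more context).
--
--     Example for 2d, for the centerpixel P, N is considered part of the neighborhood:
--
--     . . .    . N .      N N N
--     . P .    N P N      N P N
--     . . .    . N .      N N N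
--
--     NONE     SINGLE     NDIM
--
--     """
--
--     NONE = 0
--     SINGLE = 1  # Axis aligned, 2D: 4, 3D: 6
--     NDIM = 2  # Full block, 2D: 8, 3D: 26
--
-- class BlockBoundary(IntEnum):
--     NONE = 0
--     START = 1
--     STOP = 2
--
-- class SpatialAxesKeys(StrEnum):
--     x = "x"
--     y = "y"
--     z = "z"
--
-- BoundaryDescrRelative = Dict[SpatialAxesKeys, BlockBoundary]
--
-- def positive_boundaries(
--     spatial_axes: List[SpatialAxesKeys], neighborhood: Neighborhood
-- ) -> Iterator[BoundaryDescrRelative]: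
--
--     _Boundaries2D_SINGLE = ((BlockBoundary.NONE, BlockBoundary.STOP), (BlockBoundary.STOP, BlockBoundary.NONE))
--     _Boundaries2D_NDIM = _Boundaries2D_SINGLE + ((BlockBoundary.STOP, BlockBoundary.STOP),)
--
--     _Boundaries3D_SINGLE = (
--         (BlockBoundary.NONE, BlockBoundary.NONE, BlockBoundary.STOP),
--         (BlockBoundary.NONE, BlockBoundary.STOP, BlockBoundary.NONE),
--         (BlockBoundary.STOP, BlockBoundary.NONE, BlockBoundary.NONE),
--     )
--     _Boundaries3D_NDIM = _Boundaries3D_SINGLE + (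
--         (BlockBoundary.NONE, BlockBoundary.STOP, BlockBoundary.STOP),
--         (BlockBoundary.STOP, BlockBoundary.NONE, BlockBoundary.STOP),
--         (BlockBoundary.STOP, BlockBoundary.STOP, BlockBoundary.NONE),
--         (BlockBoundary.STOP, BlockBoundary.STOP, BlockBoundary.STOP),
--     )
--
--     _Boundaries = {
--         (Neighborhood.NONE, 2): (),
--         (Neighborhood.NONE, 3): (),
--         (Neighborhood.SINGLE, 2): _Boundaries2D_SINGLE,
--         (Neighborhood.SINGLE, 3): _Boundaries3D_SINGLE,
--         (Neighborhood.NDIM, 2): _Boundaries2D_NDIM,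
--         (Neighborhood.NDIM, 3): _Boundaries3D_NDIM,
--     }
--
--     n_spatial = len(spatial_axes)
--     assert n_spatial in (2, 3)
--
--     boundary_iter = _Boundaries[(neighborhood, n_spatial)]
--
--     for boundary in boundary_iter:
--         assert not all(
--             x == BlockBoundary.NONE for x in boundary
--         ), f"Unexpected, nonsensical BlockBoundary value {boundary}."
--
--         yield dict(zip(spatial_axes, boundary))
-- ===== SOURCE B (Python) =====
-- from itertools import product
--
-- from enum import IntEnum, StrEnum
-- from typing import Dict, Iterator, List, Optional, Sequence, Tuple, Union
--
-- class Neighborhood(IntEnum):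
--     NONE = 0
--     SINGLE = 1
--     NDIM = 2
--
-- class BlockBoundary(IntEnum):
--     NONE = 0
--     START = 1
--     STOP = 2
--
-- class SpatialAxesKeys(StrEnum):
--     x = "x"
--     y = "y"
--     z = "z"
--
-- def positive_boundaries(spatial_axes, neighborhood):
--     n = len(spatial_axes)
--     assert n in (2, 3)
--     if neighborhood not in (Neighborhood.NONE, Neighborhood.SINGLE, Neighborhood.NDIM):
--         raise KeyError((neighborhood, n))
--
--     def n_stops(combo):
--         return sum(1 for x in combo if x == BlockBoundary.STOP)
--
--     if neighborhood == Neighborhood.NONE: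
--         combos = []
--     else:
--         combos = [c for c in product((BlockBoundary.NONE, BlockBoundary.STOP), repeat=n)
--                   if n_stops(c) >= 1]
--         if neighborhood == Neighborhood.SINGLE:
--             combos = [c for c in combos if n_stops(c) == 1]
--         combos.sort(key=n_stops)  # stable: singles first, then pairs, then the full-STOP tuple
--
--     for c in combos:
--         yield dict(zip(spatial_axes, c))
-- ===== Notes on version B (the rewrite author's own statement) =====
-- stated objective: idiomatic
-- what changed: Replaces the hardcoded 2D/3D boundary tuple tables and dict lookup with combinatorial generation: enumerate product((NONE, STOP), repeat=n), filter by STOP count (>=1, ==1 for SINGLE, none for NONE) and stably sort by STOP count to reproduce the singles-then-pairs-then-full ordering.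
import Mathlib
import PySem

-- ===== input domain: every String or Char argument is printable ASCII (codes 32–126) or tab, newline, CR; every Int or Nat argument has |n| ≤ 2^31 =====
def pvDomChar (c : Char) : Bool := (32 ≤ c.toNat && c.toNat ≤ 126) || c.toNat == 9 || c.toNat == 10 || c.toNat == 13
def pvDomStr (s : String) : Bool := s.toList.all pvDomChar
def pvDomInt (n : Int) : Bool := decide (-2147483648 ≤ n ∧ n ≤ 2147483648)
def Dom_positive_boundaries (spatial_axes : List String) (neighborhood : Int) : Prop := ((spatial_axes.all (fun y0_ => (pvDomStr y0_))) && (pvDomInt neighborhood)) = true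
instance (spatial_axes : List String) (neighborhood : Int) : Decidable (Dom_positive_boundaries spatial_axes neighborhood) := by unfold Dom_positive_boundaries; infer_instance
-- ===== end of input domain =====

-- B replaces A's hardcoded per-dimension boundary tables with combinatorial generation
-- (product + STOP-count filter + stable sort by STOP count); objective: idiomatic.

-- dict(zip(spatial_axes, boundary)), returned as the dict's items (shared by both Pythons verbatim)
def pbDictZip (axes : List String) (boundary : List Int) : List (String × Int) :=
  ((axes.zip boundary).foldl (fun d kv => d.insert kv.1 kv.2)
    (PySem.Dict.empty (κ := String) (ν := Int))).items

-- ===== PORT A =====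
-- BlockBoundary.NONE = 0, BlockBoundary.STOP = 2 (IntEnum values)
def pbBoundaries2D_SINGLE : List (List Int) := [[0, 2], [2, 0]]
def pbBoundaries2D_NDIM : List (List Int) := pbBoundaries2D_SINGLE ++ [[2, 2]]
def pbBoundaries3D_SINGLE : List (List Int) := [[0, 0, 2], [0, 2, 0], [2, 0, 0]]
def pbBoundaries3D_NDIM : List (List Int) :=
  pbBoundaries3D_SINGLE ++ [[0, 2, 2], [2, 0, 2], [2, 2, 0], [2, 2, 2]]

-- the _Boundaries dict keyed by (neighborhood, n_spatial); Neighborhood NONE/SINGLE/NDIM = 0/1/2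
def pbTable : PySem.Dict (Int × Int) (List (List Int)) :=
  ((((((PySem.Dict.empty).insert (0, 2) []).insert (0, 3) []).insert
      (1, 2) pbBoundaries2D_SINGLE).insert (1, 3) pbBoundaries3D_SINGLE).insert
      (2, 2) pbBoundaries2D_NDIM).insert (2, 3) pbBoundaries3D_NDIM

-- assert n_spatial in (2,3) and the dict lookup raise outside Pre_; the inner
-- 'assert not all NONE' never fires on the table's entries.
def positive_boundaries (spatial_axes : List String) (neighborhood : Int) : List (List (String × Int)) :=
  let n_spatial : Int := spatial_axes.length
  let boundary_iter := (pbTable.get? (neighborhood, n_spatial)).getD []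
  boundary_iter.map (fun boundary => pbDictZip spatial_axes boundary)

-- ===== PORT B =====
-- itertools.product((NONE, STOP), repeat=n)
def pbProduct : Nat → List (List Int)
  | 0 => [[]]
  | n + 1 => ([0, 2] : List Int).flatMap (fun x => (pbProduct n).map (fun r => x :: r))

-- n_stops(combo) = sum(1 for x in combo if x == STOP)
def pbNStops (c : List Int) : Int := c.foldl (fun acc x => if x == 2 then acc + 1 else acc) 0

def positive_boundaries_alt (spatial_axes : List String) (neighborhood : Int) : List (List (String × Int)) :=
  let n := spatial_axes.length
  let combos :=
    if neighborhood == 0 then []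
    else
      let cs := (pbProduct n).filter (fun c => pbNStops c ≥ 1)
      let cs := if neighborhood == 1 then cs.filter (fun c => pbNStops c == 1) else cs
      PySem.List.sorted cs (fun c => pbNStops c)
  combos.map (fun c => pbDictZip spatial_axes c)

-- ===== PRECONDITION & SPEC =====
-- A's assert requires 2 or 3 spatial axes; its dict lookup raises KeyError for any
-- neighborhood outside {0, 1, 2} — exactly those inputs are excluded.
def Pre_positive_boundaries (spatial_axes : List String) (neighborhood : Int) : Prop :=
  (spatial_axes.length = 2 ∨ spatial_axes.length = 3) ∧
  (neighborhood = 0 ∨ neighborhood = 1 ∨ neighborhood = 2)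
instance (spatial_axes : List String) (neighborhood : Int) : Decidable (Pre_positive_boundaries spatial_axes neighborhood) := by unfold Pre_positive_boundaries; infer_instance

def pvWitness_positive_boundaries : List String × Int := (["x", "y", "z"], 2)

def Spec_positive_boundaries (spatial_axes : List String) (neighborhood : Int) (out : List (List (String × Int))) : Prop := out = positive_boundaries_alt spatial_axes neighborhood
instance (spatial_axes : List String) (neighborhood : Int) (out : List (List (String × Int))) : Decidable (Spec_positive_boundaries spatial_axes neighborhood out) := by unfold Spec_positive_boundaries; infer_instance

-- ===== CLAIM (what is proved, stated in full; the proofs are below) =====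
def Claim_equal_positive_boundaries : Prop := ∀ (spatial_axes : List String) (neighborhood : Int), Dom_positive_boundaries spatial_axes neighborhood → Pre_positive_boundaries spatial_axes neighborhood → Spec_positive_boundaries spatial_axes neighborhood (positive_boundaries spatial_axes neighborhood)

-- ===== LEMMAS AND PROOFS =====

-- B's combo pipeline equals A's table entry, for each of the six (n, neighborhood) cases.
theorem pbCombos_eq (n : Nat) (nb : Int) (hn : n = 2 ∨ n = 3) (hb : nb = 0 ∨ nb = 1 ∨ nb = 2) :
    (if nb == 0 then ([] : List (List Int))
     else
       let cs := (pbProduct n).filter (fun c => pbNStops c ≥ 1)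
       let cs := if nb == 1 then cs.filter (fun c => pbNStops c == 1) else cs
       PySem.List.sorted cs (fun c => pbNStops c)) =
    (pbTable.get? (nb, (n : Int))).getD [] := by
  rcases hn with rfl | rfl <;> rcases hb with rfl | rfl | rfl <;> decide

-- ===== VERDICT (by name: the statement is the Claim_ definition above) =====
theorem positive_boundaries_spec : Claim_equal_positive_boundaries := by
  intro sa nb _ hpre
  show positive_boundaries sa nb = positive_boundaries_alt sa nb
  simp only [positive_boundaries, positive_boundaries_alt]
  exact congrArg (List.map (fun c => pbDictZip sa c))
    (pbCombos_eq sa.length nb (by exact_mod_cast hpre.1) hpre.2).symm
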